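-- pv_equiv track=rewrite | github.com/BruceHi/leetcode | month9/minimumSwitchingTimes.py | minimumSwitchingTimes
-- ===== SOURCE A (Python) =====
-- from typing import List
-- from collections import Counter
--
-- def minimumSwitchingTimes(source: List[List[int]], target: List[List[int]]) -> int:
--     def flap(nums):
--         res = []
--         for num in nums:
--             res.extend(num)
--         return res
--
--     source = flap(source)
--     target = flap(target)
--     count1 = Counter(source)
--     count2 = Counter(target)
--     return len(list((count1 - count2).elements()))
-- ===== SOURCE B (Python) =====
-- def minimumSwitchingTimes(source, target):
--     # Sort both flattened matrices and walk them with two pointers, counting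
--     # source elements that cannot be matched with an equal target element.
--     s = sorted(x for row in source for x in row)
--     t = sorted(x for row in target for x in row)
--     i = j = 0
--     cnt = 0
--     while i < len(s) and j < len(t):
--         if s[i] == t[j]:
--             i += 1
--             j += 1
--         elif s[i] < t[j]:
--             cnt += 1
--             i += 1
--         else:
--             j += 1
--     return cnt + (len(s) - i)
-- ===== Notes on version B (the rewrite author's own statement) =====
-- stated objective: alternative
-- what changed: Replaces the two hash Counters, the Counter subtraction and the elements() expansion by sorting both flattened matrices and walking them with two pointers, counting the source elements with no equal target partner.
import Mathlib
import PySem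

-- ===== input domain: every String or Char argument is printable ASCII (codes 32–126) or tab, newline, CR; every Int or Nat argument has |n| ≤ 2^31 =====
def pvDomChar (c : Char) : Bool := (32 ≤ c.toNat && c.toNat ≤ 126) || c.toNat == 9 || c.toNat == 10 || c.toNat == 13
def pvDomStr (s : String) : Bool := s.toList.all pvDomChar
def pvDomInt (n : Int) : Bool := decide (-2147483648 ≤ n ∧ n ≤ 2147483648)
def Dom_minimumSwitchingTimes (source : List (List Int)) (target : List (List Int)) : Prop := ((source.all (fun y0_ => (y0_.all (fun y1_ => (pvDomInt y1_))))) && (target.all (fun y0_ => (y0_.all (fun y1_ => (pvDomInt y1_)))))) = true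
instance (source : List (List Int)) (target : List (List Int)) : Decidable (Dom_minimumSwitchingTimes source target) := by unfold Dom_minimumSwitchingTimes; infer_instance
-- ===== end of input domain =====

-- B replaces the Counter subtraction and elements() expansion by sorting both flattened
-- matrices and walking them with two pointers, counting unmatched source elements
-- (objective: alternative).

-- ===== PORT A =====
def minimumSwitchingTimes (source : List (List Int)) (target : List (List Int)) : Int :=
  -- flap(nums): res = []; for num in nums: res.extend(num)
  let flap : List (List Int) → List Int := fun nums => nums.foldl (fun res num => res ++ num) []
  let s := flap source
  let t := flap target
  let count1 := PySem.Dict.counter s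
  let count2 := PySem.Dict.counter t
  -- (count1 - count2): for each key of count1, keep count1[k] - count2[k] if positive;
  -- .elements() repeats each kept key that many times; len(...) of that list.
  let elems := count1.items.foldl
    (fun acc p => acc ++ List.replicate (p.2 - count2.getD p.1 0).toNat p.1) []
  (elems.length : Int)

-- ===== PORT B =====
-- the while loop over indices i, j: structural recursion on the suffixes s[i:], t[j:];
-- the final 'cnt + (len(s) - i)' is the '(s.length : Int)' on target exhaustion.
def pvGo : List Int → List Int → Int
  | [], _ => 0
  | s, [] => (s.length : Int)
  | x :: s, y :: t =>
    if x == y then pvGo s t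
    else if x < y then 1 + pvGo s (y :: t)
    else pvGo (x :: s) t
termination_by s t => s.length + t.length

def minimumSwitchingTimes_alt (source : List (List Int)) (target : List (List Int)) : Int :=
  -- s = sorted(x for row in source for x in row); same for t
  let s := PySem.List.sorted (source.flatMap (fun row => row)) (fun x => x) false
  let t := PySem.List.sorted (target.flatMap (fun row => row)) (fun x => x) false
  pvGo s t

-- ===== PRECONDITION & SPEC =====
def Spec_minimumSwitchingTimes (source : List (List Int)) (target : List (List Int)) (out : Int) : Prop := out = minimumSwitchingTimes_alt source target
instance (source : List (List Int)) (target : List (List Int)) (out : Int) : Decidable (Spec_minimumSwitchingTimes source target out) := by unfold Spec_minimumSwitchingTimes; infer_instance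

-- ===== CLAIM (what is proved, stated in full; the proofs are below) =====
def Claim_equal_minimumSwitchingTimes : Prop := ∀ (source : List (List Int)) (target : List (List Int)), Dom_minimumSwitchingTimes source target → Spec_minimumSwitchingTimes source target (minimumSwitchingTimes source target)

-- ===== LEMMAS AND PROOFS =====

theorem pv_flap (nums : List (List Int)) :
    nums.foldl (fun res num => res ++ num) [] = nums.flatMap id := by
  simpa using PySem.List.foldl_append_eq_flatMap (l := nums) (g := id) (acc := [])

theorem pv_sub_cons_of_not_mem (x : Int) (s t : Multiset Int) (h : x ∉ t) :
    (x ::ₘ s) - t = x ::ₘ (s - t) := by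
  ext a
  simp only [Multiset.count_sub, Multiset.count_cons]
  by_cases hax : a = x
  · subst hax
    have : t.count a = 0 := Multiset.count_eq_zero.mpr h
    omega
  · simp [hax]

-- card of the multiset difference as a sum over the distinct source elements.
theorem pv_card_sub (s t : List Int) :
    Multiset.card ((s : Multiset Int) - (t : Multiset Int))
      = ∑ a ∈ s.toFinset, (s.count a - t.count a) := by
  have h1 : ∑ a ∈ ((s : Multiset Int) - (t : Multiset Int)).toFinset,
      ((s : Multiset Int) - (t : Multiset Int)).count a
      = Multiset.card ((s : Multiset Int) - (t : Multiset Int)) :=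
    Multiset.toFinset_sum_count_eq _
  have hsub : ((s : Multiset Int) - (t : Multiset Int)).toFinset ⊆ s.toFinset := by
    intro a ha
    simp only [Multiset.mem_toFinset] at ha
    have := Multiset.mem_of_le (Multiset.sub_le_self _ _) ha
    simpa [List.mem_toFinset] using this
  rw [← h1, Finset.sum_subset hsub]
  · apply Finset.sum_congr rfl
    intro a _
    rw [Multiset.count_sub, Multiset.coe_count, Multiset.coe_count]
  · intro a _ ha
    simp only [Multiset.mem_toFinset] at ha
    exact Multiset.count_eq_zero.mpr ha

-- sum of a function over the PySem set of a list = sum over its toFinset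
theorem pv_sum_ofList (s : List Int) (f : Int → ℕ) :
    ((PySem.Set.ofList s).map f).sum = ∑ a ∈ s.toFinset, f a := by
  have hn : (PySem.Set.ofList s : List Int).Nodup := PySem.Set.nodup_ofList s
  have hmem : ∀ a, a ∈ (PySem.Set.ofList s : List Int) ↔ a ∈ s.toFinset := by
    intro a; simp [PySem.Set.mem_ofList, List.mem_toFinset]
  rw [← List.sum_toFinset f hn]
  apply Finset.sum_congr
  · ext a; simp [hmem a]
  · intro a _; rfl

-- A's Counter expression computes the card of the multiset difference.
theorem pv_A_card (s t : List Int) :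
    (((PySem.Dict.counter s).items.foldl
        (fun acc p => acc ++ List.replicate (p.2 - (PySem.Dict.counter t).getD p.1 0).toNat p.1)
        []).length : Int)
      = (Multiset.card ((s : Multiset Int) - (t : Multiset Int)) : Int) := by
  rw [PySem.Dict.items_counter,
      PySem.List.foldl_append_eq_flatMap
        (g := fun p : Int × Int => List.replicate (p.2 - (PySem.Dict.counter t).getD p.1 0).toNat p.1)
        (acc := [])]
  simp only [List.flatMap_map, List.nil_append, List.length_flatMap, List.length_replicate,
    PySem.Dict.getD_counter]
  rw [show (List.map (fun k => ((s.count k : Int) - (t.count k : Int)).toNat)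
        (PySem.Set.ofList s) : List ℕ)
      = (PySem.Set.ofList s).map (fun k => s.count k - t.count k) from by
    apply List.map_congr_left; intro a _; omega]
  rw [pv_sum_ofList s (fun a => s.count a - t.count a), ← pv_card_sub s t]

-- the two-pointer walk on sorted lists computes the card of the multiset difference
theorem pv_go_card (s t : List Int)
    (hs : s.Pairwise (· ≤ ·)) (ht : t.Pairwise (· ≤ ·)) :
    pvGo s t = (Multiset.card ((s : Multiset Int) - (t : Multiset Int)) : Int) := by
  induction s, t using pvGo.induct with
  | case1 t => simp [pvGo]
  | case2 s h => simp [pvGo]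
  | case3 x s y t heq ih =>
    have hx : x = y := by simpa using heq
    subst hx
    rw [pvGo, if_pos (by simp)]
    rw [ih (List.Pairwise.of_cons hs) (List.Pairwise.of_cons ht)]
    rw [← Multiset.cons_coe, ← Multiset.cons_coe, Multiset.sub_cons, Multiset.erase_cons_head]
  | case4 x s y t heq hlt ih =>
    have hxy : x ≠ y := by simpa using heq
    have hnm : x ∉ (y :: t) := by
      intro hmem
      rcases List.mem_cons.mp hmem with h | h
      · exact hxy h
      · have := (List.pairwise_cons.mp ht).1 x h
        omega
    have hnm' : x ∉ (y ::ₘ ((t : List Int) : Multiset Int)) := by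
      simp only [Multiset.mem_cons, Multiset.mem_coe]
      push Not
      exact ⟨hxy, fun h => hnm (List.mem_cons.mpr (Or.inr h))⟩
    rw [pvGo, if_neg (by simpa using hxy), if_pos hlt]
    rw [ih (List.Pairwise.of_cons hs) ht]
    simp only [← Multiset.cons_coe]
    rw [pv_sub_cons_of_not_mem x _ _ hnm', Multiset.card_cons]
    push_cast; ring
  | case5 x s y t heq hlt ih =>
    have hxy : x ≠ y := by simpa using heq
    have hyx : y < x := by omega
    have hnm : y ∉ (x :: s) := by
      intro hmem
      rcases List.mem_cons.mp hmem with h | h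
      · omega
      · have := (List.pairwise_cons.mp hs).1 y h
        omega
    rw [pvGo, if_neg (by simpa using hxy), if_neg (by omega)]
    rw [ih hs (List.Pairwise.of_cons ht)]
    simp only [← Multiset.cons_coe]
    rw [Multiset.sub_cons, Multiset.erase_of_notMem (by simpa using hnm)]

-- ===== VERDICT (by name: the statement is the Claim_ definition above) =====
theorem minimumSwitchingTimes_spec : Claim_equal_minimumSwitchingTimes := by
  intro source target _
  unfold Spec_minimumSwitchingTimes minimumSwitchingTimes minimumSwitchingTimes_alt
  simp only [pv_flap]
  set s := source.flatMap id with hs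
  set t := target.flatMap id with ht
  have hsrc : source.flatMap (fun row => row) = s := rfl
  have htgt : target.flatMap (fun row => row) = t := rfl
  rw [hsrc, htgt, pv_A_card,
      pv_go_card _ _
        (PySem.List.sorted_pairwise (xs := s) (key := fun x => x))
        (PySem.List.sorted_pairwise (xs := t) (key := fun x => x))]
  rw [Multiset.coe_eq_coe.mpr (PySem.List.sorted_perm s (fun x => x) false),
      Multiset.coe_eq_coe.mpr (PySem.List.sorted_perm t (fun x => x) false)]
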